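-- pv_equiv track=rewrite | github.com/yknot/adventOfCode | 2023/04_01.py | check_tickets
-- ===== SOURCE A (Python) =====
-- def check_tickets(lines):
--     total = 0
--     for win, mine in lines:
--         pts = 0
--         for m in mine:
--             if m in win:
--                 if pts == 0:
--                     pts = 1
--                 else:
--                     pts *= 2
--
--         total += pts
--
--     return total
-- ===== SOURCE B (Python) =====
-- def check_tickets(lines):
--     total = 0
--     for win, mine in lines:
--         cnt = {}
--         for m in mine:
--             cnt[m] = cnt.get(m, 0) + 1
--         k = 0
--         for v in set(win):
--             k += cnt.get(v, 0)
--         if k: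
--             total += 1 << (k - 1)
--     return total
-- ===== Notes on version B (the rewrite author's own statement) =====
-- stated objective: faster
-- what changed: Per card, B builds a dict of multiplicities of mine once and sums it over set(win), eliminating A's inner membership scan of win for every element of mine, and scores with a single bit shift instead of A's double-per-match accumulation.
import Mathlib
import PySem

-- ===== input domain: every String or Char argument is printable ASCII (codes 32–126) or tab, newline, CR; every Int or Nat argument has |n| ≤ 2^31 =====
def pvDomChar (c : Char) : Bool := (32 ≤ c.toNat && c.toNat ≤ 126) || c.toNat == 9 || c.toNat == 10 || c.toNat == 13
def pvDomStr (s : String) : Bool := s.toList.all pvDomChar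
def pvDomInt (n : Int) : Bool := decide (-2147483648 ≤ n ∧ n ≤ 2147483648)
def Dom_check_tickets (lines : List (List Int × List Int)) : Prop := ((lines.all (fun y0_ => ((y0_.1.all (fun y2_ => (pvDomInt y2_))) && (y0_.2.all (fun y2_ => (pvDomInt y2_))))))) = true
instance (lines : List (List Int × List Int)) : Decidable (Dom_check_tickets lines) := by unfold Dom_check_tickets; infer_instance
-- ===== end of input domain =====

-- B counts each card's matches via a hash counter of `mine` summed over set(win) (removing the
-- inner membership scan per element) and scores by one bit shift, instead of A's double-per-match loop.


-- ===== PORT A =====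
-- inner loop: pts starts at 0; on a match, 0 ↦ 1, otherwise doubled
def check_tickets (lines : List (List Int × List Int)) : Int :=
  lines.foldl
    (fun total wm =>
      total +
        wm.2.foldl
          (fun pts m =>
            if wm.1.contains m then (if pts = 0 then 1 else pts * 2) else pts)
          0)
    0

-- ===== PORT B =====
-- build cnt = {m: multiplicity} over mine, sum cnt over set(win) to get k, then score by one shift
-- (1 << (k-1); the shift count k-1 is ≥ 0 in that branch, .toNat is exact there)
def check_tickets_alt (lines : List (List Int × List Int)) : Int :=
  lines.foldl
    (fun total wm =>
      let cnt : PySem.Dict Int Int :=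
        wm.2.foldl (fun d m => d.insert m (d.getD m 0 + 1)) PySem.Dict.empty
      let k : Int := (PySem.Set.ofList wm.1).foldl (fun k v => k + cnt.getD v 0) 0
      if k ≠ 0 then total + (1 : Int) <<< (k - 1).toNat else total)
    0

-- ===== PRECONDITION & SPEC =====
def Spec_check_tickets (lines : List (List Int × List Int)) (out : Int) : Prop := out = check_tickets_alt lines
instance (lines : List (List Int × List Int)) (out : Int) : Decidable (Spec_check_tickets lines out) := by unfold Spec_check_tickets; infer_instance

-- ===== CLAIM (what is proved, stated in full; the proofs are below) =====
def Claim_equal_check_tickets : Prop := ∀ (lines : List (List Int × List Int)), Dom_check_tickets lines → Spec_check_tickets lines (check_tickets lines)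

-- ===== LEMMAS AND PROOFS =====

-- the per-card score both programs compute, in closed form
def pvScore (wm : List Int × List Int) : Int :=
  let k := wm.2.countP (fun m => wm.1.contains m)
  if k = 0 then 0 else 2 ^ (k - 1)

-- A-side: once pts is positive, each match doubles it
theorem pv_inner_pos (win : List Int) (mine : List Int) (p : Int) (hp : 0 < p) :
    mine.foldl (fun pts m => if win.contains m then (if pts = 0 then 1 else pts * 2) else pts) p
      = p * 2 ^ (mine.countP (fun m => win.contains m)) := by
  induction mine generalizing p with
  | nil => simp
  | cons m ms ih =>
    rw [List.foldl_cons, List.countP_cons]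
    by_cases h : win.contains m = true
    · rw [if_pos h, if_neg (ne_of_gt hp), ih (p * 2) (by positivity), h, if_pos rfl, pow_succ]
      ring
    · rw [Bool.not_eq_true] at h
      have h0 : (if false = true then (if p = 0 then 1 else p * 2) else p) = p := rfl
      have hf : (if false = true then 1 else 0) = 0 := rfl
      rw [h, h0, hf, Nat.add_zero, ih p hp]

-- A-side: from pts = 0 the inner loop yields the closed-form score
theorem pv_inner_zero (win : List Int) (mine : List Int) :
    mine.foldl (fun pts m => if win.contains m then (if pts = 0 then 1 else pts * 2) else pts) 0
      = pvScore (win, mine) := by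
  unfold pvScore
  induction mine with
  | nil => simp
  | cons m ms ih =>
    rw [List.foldl_cons, List.countP_cons]
    by_cases h : win.contains m = true
    · rw [if_pos h, if_pos rfl, pv_inner_pos win ms 1 one_pos, h, if_pos rfl, one_mul,
        if_neg (Nat.succ_ne_zero _), Nat.add_sub_cancel]
    · rw [Bool.not_eq_true] at h
      have h0 : (if false = true then (if (0 : Int) = 0 then 1 else 0 * 2) else 0) = (0 : Int) := rfl
      have hf : (if false = true then 1 else 0) = 0 := rfl
      rw [h, h0, hf, Nat.add_zero, ih]

-- folding additions equals the sum of the mapped values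
theorem pv_foldl_add_map (g : (List Int × List Int) → Int) (lines : List (List Int × List Int)) (t : Int) :
    lines.foldl (fun total wm => total + g wm) t = t + (lines.map g).sum := by
  induction lines generalizing t with
  | nil => simp
  | cons x xs ih => simp [List.foldl_cons, ih, add_assoc]

-- summing one indicator over a duplicate-free list is a membership test
theorem pv_ind_sum (m : Int) (l : List Int) (hl : l.Nodup) :
    (l.map (fun v => if v == m then (1 : Int) else 0)).sum
      = (if l.contains m then 1 else 0) := by
  induction l with
  | nil => simp
  | cons x xs ih =>
    rcases List.nodup_cons.mp hl with ⟨hx, hxs⟩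
    simp only [List.map_cons, List.sum_cons, List.contains_cons, ih hxs]
    by_cases h : x = m
    · subst h
      have hm : xs.contains x = false := by simpa using hx
      simp [hx]
    · have h' : ¬ m = x := fun e => h e.symm
      simp [beq_iff_eq, h, h']

-- summing occurrence counts over a duplicate-free list of candidates = countP by membership
theorem pv_count_sum (l : List Int) (hl : l.Nodup) (mine : List Int) :
    (l.map (fun v => (mine.count v : Int))).sum
      = (mine.countP (fun m => l.contains m) : Int) := by
  induction mine with
  | nil => simp
  | cons m ms ih =>
    have hc : ∀ v : Int, ((m :: ms).count v : Int)
        = (ms.count v : Int) + (if v == m then (1 : Int) else 0) := by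
      intro v
      rw [List.count_cons]
      by_cases h : v = m
      · simp [h]
      · simp [h, Ne.symm h]
    calc (l.map (fun v => ((m :: ms).count v : Int))).sum
        = (l.map (fun v => (ms.count v : Int) + (if v == m then (1 : Int) else 0))).sum := by
          simp only [hc]
      _ = (l.map (fun v => (ms.count v : Int))).sum
            + (l.map (fun v => if v == m then (1 : Int) else 0)).sum := by
          rw [← List.sum_map_add]
      _ = (ms.countP (fun x => l.contains x) : Int) + (if l.contains m then 1 else 0) := by
          rw [ih, pv_ind_sum m l hl]
      _ = ((m :: ms).countP (fun x => l.contains x) : Int) := by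
          rw [List.countP_cons]
          by_cases h : l.contains m = true <;> simp [h]


-- B's k is exactly the match count of A
theorem pv_k_eq (win mine : List Int) :
    (PySem.Set.ofList win).foldl
        (fun k v => k + (mine.foldl (fun d m => d.insert m (d.getD m 0 + 1)) PySem.Dict.empty).getD v 0) 0
      = (mine.countP (fun m => win.contains m) : Int) := by
  have hcnt : ∀ v : Int,
      (mine.foldl (fun d m => d.insert m (d.getD m 0 + 1)) PySem.Dict.empty).getD v 0
        = (mine.count v : Int) := by
    intro v
    rw [PySem.Dict.foldl_insert_getD_add_one_eq_counter, PySem.Dict.getD_counter]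
  have hfold : ∀ (l : List Int) (t : Int),
      l.foldl (fun k v => k + (mine.foldl (fun d m => d.insert m (d.getD m 0 + 1)) PySem.Dict.empty).getD v 0) t
        = t + (l.map (fun v => (mine.count v : Int))).sum := by
    intro l
    induction l with
    | nil => simp
    | cons x xs ih => intro t; simp [List.foldl_cons, ih, hcnt x, add_assoc]
  rw [hfold, zero_add,
    pv_count_sum (PySem.Set.ofList win) (PySem.Set.nodup_ofList win) mine]
  congr 1
  apply List.countP_congr
  intro m _
  constructor <;> intro h <;>
    [skip; skip] <;>
    · simp only [List.contains_iff_mem, PySem.Set.mem_ofList] at *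
      exact h

-- B's per-card branch equals the closed-form score
theorem pv_B_elem (total : Int) (wm : List Int × List Int) :
    (let cnt : PySem.Dict Int Int :=
        wm.2.foldl (fun d m => d.insert m (d.getD m 0 + 1)) PySem.Dict.empty
     let k : Int := (PySem.Set.ofList wm.1).foldl (fun k v => k + cnt.getD v 0) 0
     if k ≠ 0 then total + (1 : Int) <<< (k - 1).toNat else total)
      = total + pvScore wm := by
  simp only [pv_k_eq wm.1 wm.2, pvScore]
  set c : Nat := wm.2.countP (fun m => wm.1.contains m) with hc
  by_cases h : c = 0
  · simp [h]
  · have h1 : 1 ≤ c := Nat.one_le_iff_ne_zero.mpr h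
    have hne : ((c : Int)) ≠ 0 := by exact_mod_cast h
    have ht : ((c : Int) - 1).toNat = c - 1 := by omega
    have hs : (1 : Int) <<< (c - 1) = 2 ^ (c - 1) := by
      rw [Int.shiftLeft_eq]; ring
    simp [ht, hs, h]

-- B's outer fold equals the sum of closed-form scores
theorem pv_B_fold (lines : List (List Int × List Int)) (t : Int) :
    lines.foldl
      (fun total wm =>
        let cnt : PySem.Dict Int Int :=
          wm.2.foldl (fun d m => d.insert m (d.getD m 0 + 1)) PySem.Dict.empty
        let k : Int := (PySem.Set.ofList wm.1).foldl (fun k v => k + cnt.getD v 0) 0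
        if k ≠ 0 then total + (1 : Int) <<< (k - 1).toNat else total) t
      = t + (lines.map pvScore).sum := by
  induction lines generalizing t with
  | nil => simp
  | cons x xs ih =>
    rw [List.foldl_cons]
    simp only []
    rw [pv_B_elem t x, ih, List.map_cons, List.sum_cons]
    ring

-- ===== VERDICT (by name: the statement is the Claim_ definition above) =====
theorem check_tickets_spec : Claim_equal_check_tickets := by
  intro lines _
  unfold Spec_check_tickets check_tickets check_tickets_alt
  rw [pv_B_fold, zero_add,
    pv_foldl_add_map (fun wm =>
      wm.2.foldl (fun pts m => if wm.1.contains m then (if pts = 0 then 1 else pts * 2) else pts) 0),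
    zero_add]
  congr 1
  apply List.map_congr_left
  intro wm _
  exact pv_inner_zero wm.1 wm.2
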